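-- pv_equiv track=rewrite | github.com/JunSeokCheon/self-problem-solving- | BOJ_workbook/BOJ_4659_비밀번호 발음하기.py | second_rule
-- ===== SOURCE A (Python) =====
-- def second_rule(word):
--     if len(word) <= 2:
--         return True
--
--     for i in range(len(word)-2):
--         if word[i] in vowel and word[i+1] in vowel and word[i+2] in vowel:
--             return False
--
--         if word[i] not in vowel and word[i+1] not in vowel and word[i+2] not in vowel:
--             return False
--
--     return True
--
-- vowel = ['a', 'e', 'i', 'o', 'u']
-- ===== SOURCE B (Python) =====
-- def second_rule(word):
--     if not word:
--         return True
--     prev = word[0] in vowel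
--     run = 1
--     for ch in word[1:]:
--         cur = ch in vowel
--         run = run + 1 if cur == prev else 1
--         if run >= 3:
--             return False
--         prev = cur
--     return True
--
-- vowel = ['a', 'e', 'i', 'o', 'u']
-- ===== Notes on version B (the rewrite author's own statement) =====
-- stated objective: alternative
-- what changed: Replaced A's index loop testing every triple word[i..i+2] against the vowel list (six membership tests per position) by a single left-to-right scan maintaining a run-length counter of consecutive same-type characters, failing as soon as a run reaches 3.
import Mathlib
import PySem

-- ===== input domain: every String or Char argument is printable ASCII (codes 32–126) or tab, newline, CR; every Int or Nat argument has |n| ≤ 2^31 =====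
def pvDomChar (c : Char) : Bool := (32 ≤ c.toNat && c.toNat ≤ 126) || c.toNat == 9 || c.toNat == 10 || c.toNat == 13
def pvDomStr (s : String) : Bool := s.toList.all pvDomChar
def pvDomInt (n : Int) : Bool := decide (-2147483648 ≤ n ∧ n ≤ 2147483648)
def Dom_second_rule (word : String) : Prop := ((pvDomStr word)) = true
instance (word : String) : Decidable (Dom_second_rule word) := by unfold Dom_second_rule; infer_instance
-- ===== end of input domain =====

-- B replaces A's per-index triple test by a single scan with a run-length counter (alternative decomposition, same O(n) cost).

-- `vowel = ['a', 'e', 'i', 'o', 'u']`; `c in vowel`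
def pvVowel : List Char := ['a', 'e', 'i', 'o', 'u']
def isVowel (c : Char) : Bool := pvVowel.contains c

-- ===== PORT A =====
-- A's for-loop over i in range(len-2) tests the window word[i], word[i+1], word[i+2];
-- ported as recursion over the char list keeping the current 3-char window at the head.
def secondRuleLoopA : List Char → Bool
  | a :: b :: c :: rest =>
      if isVowel a && isVowel b && isVowel c then false
      else if !isVowel a && !isVowel b && !isVowel c then false
      else secondRuleLoopA (b :: c :: rest)
  | _ => true

def second_rule (word : String) : Bool :=
  if word.toList.length ≤ 2 then true
  else secondRuleLoopA word.toList

-- ===== PORT B =====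
-- B's for-loop: state (prev, run) = vowel-status of previous char and length of current same-type run.
def secondRuleLoopB : List Char → Bool → Int → Bool
  | [], _, _ => true
  | ch :: rest, prev, run =>
      let cur := isVowel ch
      let run' := if cur = prev then run + 1 else 1
      if run' ≥ 3 then false
      else secondRuleLoopB rest cur run'

def second_rule_alt (word : String) : Bool :=
  match word.toList with
  | [] => true
  | c :: rest => secondRuleLoopB rest (isVowel c) 1

-- ===== PRECONDITION & SPEC =====
def Spec_second_rule (word : String) (out : Bool) : Prop := out = second_rule_alt word
instance (word : String) (out : Bool) : Decidable (Spec_second_rule word out) := by unfold Spec_second_rule; infer_instance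

-- ===== CLAIM (what is proved, stated in full; the proofs are below) =====
def Claim_equal_second_rule : Prop := ∀ (word : String), Dom_second_rule word → Spec_second_rule word (second_rule word)

-- ===== LEMMAS AND PROOFS =====

-- Invariant linking A's 3-char window to B's run counter: b, c are the two previous
-- characters; run r = 1 means they have different types, r ≥ 2 means the same type.
lemma key (rest : List Char) : ∀ (b c : Char) (r : Int), 1 ≤ r →
    (r = 1 → isVowel b ≠ isVowel c) → (2 ≤ r → isVowel b = isVowel c) →
    secondRuleLoopA (b :: c :: rest) = secondRuleLoopB rest (isVowel c) r := by
  induction rest with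
  | nil => intro b c r _ _ _; simp [secondRuleLoopA, secondRuleLoopB]
  | cons d rest ih =>
    intro b c r hr h1 h2
    simp only [secondRuleLoopA, secondRuleLoopB]
    by_cases hdc : isVowel d = isVowel c
    · by_cases hr2 : 2 ≤ r
      · have hbc := h2 hr2
        have hv : (isVowel b && isVowel c && isVowel d) || (!isVowel b && !isVowel c && !isVowel d) := by
          cases hb : isVowel b <;> cases hc : isVowel c <;> cases hd : isVowel d <;>
            simp_all
        have hrun : (if isVowel d = isVowel c then r + 1 else 1) ≥ 3 := by
          simp [hdc]; omega
        rcases Bool.or_eq_true_iff.mp hv with h | h <;> simp [h, hrun]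
      · have hr1 : r = 1 := by omega
        have hbc := h1 hr1
        have hA1 : (isVowel b && isVowel c && isVowel d) = false := by
          cases hb : isVowel b <;> cases hc : isVowel c <;> simp_all
        have hA2 : (!isVowel b && !isVowel c && !isVowel d) = false := by
          cases hb : isVowel b <;> cases hc : isVowel c <;> simp_all
        have hrun : ¬ ((if isVowel d = isVowel c then r + 1 else 1) ≥ 3) := by
          simp [hdc]; omega
        simp only [hA1, hA2, if_neg hrun, Bool.false_eq_true, if_false]
        have := ih c d (r + 1) (by omega) (by omega) (fun _ => hdc.symm)
        simpa [hdc, hr1] using this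
    · have hA1 : (isVowel b && isVowel c && isVowel d) = false := by
        cases hc : isVowel c <;> cases hd : isVowel d <;> simp_all
      have hA2 : (!isVowel b && !isVowel c && !isVowel d) = false := by
        cases hc : isVowel c <;> cases hd : isVowel d <;> simp_all
      have hrun : ¬ ((if isVowel d = isVowel c then r + 1 else 1) ≥ 3) := by
        simp [hdc]
      simp only [hA1, hA2, if_neg hrun, Bool.false_eq_true, if_false]
      have := ih c d 1 (by omega) (fun _ => fun h => hdc h.symm) (by omega)
      simpa [hdc] using this

lemma start (c : Char) (rest : List Char) :
    secondRuleLoopA (c :: rest) = secondRuleLoopB rest (isVowel c) 1 := by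
  cases rest with
  | nil => simp [secondRuleLoopA, secondRuleLoopB]
  | cons d rest' =>
    simp only [secondRuleLoopB]
    by_cases hdc : isVowel d = isVowel c
    · have hrun : ¬ ((if isVowel d = isVowel c then (1 : Int) + 1 else 1) ≥ 3) := by
        simp [hdc]
      simp only [if_neg hrun]
      have := key rest' c d 2 (by omega) (by omega) (fun _ => hdc.symm)
      simpa [hdc] using this
    · have hrun : ¬ ((if isVowel d = isVowel c then (1 : Int) + 1 else 1) ≥ 3) := by
        simp [hdc]
      simp only [if_neg hrun]
      have := key rest' c d 1 (by omega) (fun _ h => hdc h.symm) (by omega)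
      simpa [hdc] using this

lemma loopA_short (cs : List Char) (h : cs.length ≤ 2) : secondRuleLoopA cs = true := by
  match cs, h with
  | [], _ => rfl
  | [_], _ => rfl
  | [_, _], _ => rfl

-- ===== VERDICT (by name: the statement is the Claim_ definition above) =====
theorem second_rule_spec : Claim_equal_second_rule := by
  intro word _
  unfold Spec_second_rule second_rule second_rule_alt
  cases h : word.toList with
  | nil => simp
  | cons c rest =>
    have hm : (match c :: rest with
        | [] => true
        | c :: rest => secondRuleLoopB rest (isVowel c) 1) = secondRuleLoopB rest (isVowel c) 1 := rfl
    rw [hm, ← start c rest]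
    split
    · next hlen => exact (loopA_short _ hlen).symm
    · rfl
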